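-- pv_equiv track=rewrite | github.com/sheindel/wordle_py | src/wordle/util.py | get_networked_weight
-- ===== SOURCE A (Python) =====
-- def get_networked_weight(word_list):
--     weights = dict(zip(word_list, [0] * len(word_list)))
--     for word in word_list:
--         for char in list(word):
--             for word in word_list:
--                 if char in word:
--                     weights[word] += 1
--
--     return weights
-- ===== SOURCE B (Python) =====
-- def get_networked_weight(word_list):
--     # One pass: total occurrences of each character across the whole list, plus each
--     # word's multiplicity (duplicate words share one dict entry that accumulates once
--     # per occurrence, as in the original); then
--     # weight(w) = multiplicity(w) * sum of the totals of w's distinct characters.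
--     counts = {}
--     for w in word_list:
--         for c in w:
--             counts[c] = counts.get(c, 0) + 1
--     mult = {}
--     for w in word_list:
--         mult[w] = mult.get(w, 0) + 1
--     return {w: mult[w] * sum(counts.get(c, 0) for c in set(w)) for w in word_list}
-- ===== Notes on version B (the rewrite author's own statement) =====
-- stated objective: faster
-- what changed: Replaces A's triple nested loop (for every char occurrence of every word, rescan the whole word list) by one pass that builds a character-frequency table and a word-multiplicity table, then computes each word's weight directly as multiplicity times the sum of its distinct characters' totals.
import Mathlib
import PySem

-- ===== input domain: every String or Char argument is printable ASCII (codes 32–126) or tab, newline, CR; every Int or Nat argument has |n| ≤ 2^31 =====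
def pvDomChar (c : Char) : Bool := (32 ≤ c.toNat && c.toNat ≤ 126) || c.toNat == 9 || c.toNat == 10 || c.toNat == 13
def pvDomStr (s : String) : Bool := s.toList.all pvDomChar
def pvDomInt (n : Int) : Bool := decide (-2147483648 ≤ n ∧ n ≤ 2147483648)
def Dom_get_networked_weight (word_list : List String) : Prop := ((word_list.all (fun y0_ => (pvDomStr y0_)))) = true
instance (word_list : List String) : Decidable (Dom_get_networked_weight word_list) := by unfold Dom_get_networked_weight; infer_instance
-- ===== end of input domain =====

-- B replaces A's triple nested loop by one pass building a character-frequency table and a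
-- word-multiplicity table, from which each word's weight is computed directly (asymptotically faster).

-- ===== PORT A =====
-- weights = dict(zip(word_list, [0] * len(word_list)))
def aWeights0 (word_list : List String) : PySem.Dict String Int :=
  (word_list.zip (List.replicate word_list.length (0 : Int))).foldl
    (fun d p => d.insert p.1 p.2) PySem.Dict.empty

-- the triple nested loop; `char in word` for a 1-char string is char membership;
-- `weights[word] += 1` never raises (every word of word_list is a key), so Dict.modify is exact here
def aFinal (word_list : List String) : PySem.Dict String Int :=
  word_list.foldl (fun d word =>
    word.toList.foldl (fun d char =>
      word_list.foldl (fun d w =>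
        if char ∈ w.toList then d.modify w 0 (· + 1) else d) d) d) (aWeights0 word_list)

def get_networked_weight (word_list : List String) : List (String × Int) :=
  (aFinal word_list).items

-- ===== PORT B =====
-- counts[c] = total number of occurrences of c across all words
def bCounts (word_list : List String) : PySem.Dict Char Int :=
  word_list.foldl (fun d w =>
    w.toList.foldl (fun d c => d.insert c (d.getD c 0 + 1)) d) PySem.Dict.empty

-- mult[w] = mult.get(w, 0) + 1 over the list: the multiplicity of each word
def bMult (word_list : List String) : PySem.Dict String Int :=
  word_list.foldl (fun d w => d.insert w (d.getD w 0 + 1)) PySem.Dict.empty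

-- sum(counts.get(c, 0) for c in set(w))  (sum over a Python set: order-independent)
def bWeight (counts : PySem.Dict Char Int) (w : String) : Int :=
  ((PySem.Set.ofList w.toList).map (fun c => counts.getD c 0)).sum

def get_networked_weight_alt (word_list : List String) : List (String × Int) :=
  (word_list.foldl (fun d w =>
      d.insert w ((bMult word_list).getD w 0 * bWeight (bCounts word_list) w))
    PySem.Dict.empty).items

-- ===== PRECONDITION & SPEC =====
def Spec_get_networked_weight (word_list : List String) (out : List (String × Int)) : Prop :=
  out = get_networked_weight_alt word_list
instance (word_list : List String) (out : List (String × Int)) : Decidable (Spec_get_networked_weight word_list out) := by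
  unfold Spec_get_networked_weight; infer_instance

-- ===== CLAIM (what is proved, stated in full; the proofs are below) =====
def Claim_equal_get_networked_weight : Prop := ∀ (word_list : List String), Dom_get_networked_weight word_list → Spec_get_networked_weight word_list (get_networked_weight word_list)

-- ===== LEMMAS AND PROOFS =====

-- the common value: number of character occurrences across word_list that lie in k
def wSum (word_list : List String) (k : String) : Nat :=
  (word_list.flatMap String.toList).countP (fun c => decide (c ∈ k.toList))

-- ---- port A characterisation ----

theorem zip_replicate_zero (l : List String) :
    l.zip (List.replicate l.length (0 : Int)) = l.map (fun w => (w, (0 : Int))) := by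
  induction l with
  | nil => rfl
  | cons a l ih => simp [List.replicate_succ, ih]

theorem aWeights0_keys (wl : List String) : (aWeights0 wl).keys = PySem.Set.ofList wl := by
  unfold aWeights0
  rw [zip_replicate_zero, List.foldl_map]
  rw [PySem.Dict.keys_foldl_insert wl (fun _ _ => (0 : Int)) PySem.Dict.empty]
  simp [PySem.Dict.keys_empty, PySem.Set.update_nil_left]

theorem getD_foldl_insert_zero (l : List String) (d : PySem.Dict String Int)
    (h : ∀ k, d.getD k 0 = 0) : ∀ k, (l.foldl (fun d w => d.insert w 0) d).getD k 0 = 0 := by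
  induction l generalizing d with
  | nil => exact h
  | cons w l ih =>
      intro k
      exact ih _ (fun k' => by rw [PySem.Dict.getD_insert]; split <;> simp [h]) k

theorem aWeights0_getD (wl : List String) (k : String) : (aWeights0 wl).getD k 0 = 0 := by
  unfold aWeights0
  rw [zip_replicate_zero, List.foldl_map]
  exact getD_foldl_insert_zero wl PySem.Dict.empty (fun k => by simp [PySem.Dict.getD_empty]) k

-- the innermost loop: for w in word_list: if char in w: weights[w] += 1
theorem inner_getD (c : Char) (ws : List String) (d : PySem.Dict String Int) (k : String) :
    (ws.foldl (fun d w => if c ∈ w.toList then d.modify w 0 (· + 1) else d) d).getD k 0 =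
      d.getD k 0 + if c ∈ k.toList then (ws.count k : Int) else 0 := by
  induction ws generalizing d with
  | nil => simp
  | cons w ws ih =>
      rw [List.foldl_cons, ih, List.count_cons]
      by_cases hkw : k = w
      · subst hkw
        by_cases hc : c ∈ k.toList
        · simp [hc]; ring
        · simp [hc]
      · have hbeq : (w == k) = false := beq_eq_false_iff_ne.2 (fun h' => hkw h'.symm)
        by_cases hcw : c ∈ w.toList
        · simp [hcw, PySem.Dict.getD_modify, hkw, hbeq]
        · simp [hcw, hbeq]

theorem inner_keys (c : Char) (ws : List String) (d : PySem.Dict String Int)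
    (h : ∀ w ∈ ws, w ∈ d.keys) :
    (ws.foldl (fun d w => if c ∈ w.toList then d.modify w 0 (· + 1) else d) d).keys = d.keys := by
  induction ws generalizing d with
  | nil => rfl
  | cons w ws ih =>
      rw [List.foldl_cons]
      by_cases hc : c ∈ w.toList
      · simp only [hc, if_pos]
        have hkeys : (d.modify w 0 (· + 1)).keys = d.keys := by
          rw [PySem.Dict.keys_modify, PySem.Dict.keys_insert_of_contains]
          exact (PySem.Dict.contains_iff_mem_keys d w).2 (h w (by simp))
        rw [ih _ (by rw [hkeys]; exact fun x hx => h x (by simp [hx]))]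
        exact hkeys
      · simp only [hc, ite_false]
        exact ih _ (fun x hx => h x (by simp [hx]))

-- the middle loop over the characters of one word
theorem middle_getD (wl : List String) (cs : List Char) (d : PySem.Dict String Int) (k : String) :
    (cs.foldl (fun d char => wl.foldl (fun d w =>
        if char ∈ w.toList then d.modify w 0 (· + 1) else d) d) d).getD k 0 =
      d.getD k 0 + (wl.count k : Int) * (cs.countP (fun c => decide (c ∈ k.toList)) : Int) := by
  induction cs generalizing d with
  | nil => simp
  | cons c cs ih =>
      rw [List.foldl_cons, ih, inner_getD, List.countP_cons]
      by_cases hc : c ∈ k.toList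
      · simp [hc]; ring
      · simp [hc]

theorem middle_keys (wl : List String) (cs : List Char) (d : PySem.Dict String Int)
    (h : ∀ w ∈ wl, w ∈ d.keys) :
    (cs.foldl (fun d char => wl.foldl (fun d w =>
        if char ∈ w.toList then d.modify w 0 (· + 1) else d) d) d).keys = d.keys := by
  induction cs generalizing d with
  | nil => rfl
  | cons c cs ih =>
      rw [List.foldl_cons, ih _ (fun x hx => by rw [inner_keys c wl d h]; exact h x hx),
        inner_keys c wl d h]

theorem outer_getD (wl ws : List String) (d : PySem.Dict String Int) (k : String) :
    (ws.foldl (fun d word => word.toList.foldl (fun d char => wl.foldl (fun d w =>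
        if char ∈ w.toList then d.modify w 0 (· + 1) else d) d) d) d).getD k 0 =
      d.getD k 0 + (wl.count k : Int) *
        ((ws.flatMap String.toList).countP (fun c => decide (c ∈ k.toList)) : Int) := by
  induction ws generalizing d with
  | nil => simp
  | cons word ws ih =>
      rw [List.foldl_cons, ih, middle_getD]
      simp [List.countP_append]
      ring

theorem outer_keys (wl ws : List String) (d : PySem.Dict String Int)
    (h : ∀ w ∈ wl, w ∈ d.keys) :
    (ws.foldl (fun d word => word.toList.foldl (fun d char => wl.foldl (fun d w =>
        if char ∈ w.toList then d.modify w 0 (· + 1) else d) d) d) d).keys = d.keys := by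
  induction ws generalizing d with
  | nil => rfl
  | cons word ws ih =>
      rw [List.foldl_cons, ih _ (fun x hx => by rw [middle_keys wl _ d h]; exact h x hx),
        middle_keys wl _ d h]

theorem aFinal_keys (wl : List String) : (aFinal wl).keys = PySem.Set.ofList wl := by
  unfold aFinal
  rw [outer_keys wl wl _ (fun w hw => by
    rw [aWeights0_keys]; exact (PySem.Set.mem_ofList wl w).2 hw)]
  exact aWeights0_keys wl

theorem aFinal_getD (wl : List String) (k : String) :
    (aFinal wl).getD k 0 = (wl.count k : Int) * (wSum wl k : Int) := by
  unfold aFinal wSum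
  rw [outer_getD, aWeights0_getD, zero_add]

-- ---- port B characterisation ----

theorem bCounts_getD (wl : List String) (c : Char) :
    (bCounts wl).getD c 0 = ((wl.flatMap String.toList).count c : Int) := by
  unfold bCounts
  suffices h : ∀ (ws : List String) (d : PySem.Dict Char Int),
      (ws.foldl (fun d w => w.toList.foldl (fun d c => d.insert c (d.getD c 0 + 1)) d) d).getD c 0 =
        d.getD c 0 + ((ws.flatMap String.toList).count c : Int) by
    rw [h]; simp [PySem.Dict.getD_empty]
  intro ws
  induction ws with
  | nil => simp
  | cons w ws ih =>
      intro d
      rw [List.foldl_cons, ih, PySem.Dict.getD_foldl_insert_add_one]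
      simp [List.count_append]
      ring

theorem bMult_getD (wl : List String) (k : String) :
    (bMult wl).getD k 0 = (wl.count k : Int) := by
  unfold bMult
  rw [PySem.Dict.getD_foldl_insert_add_one]
  simp [PySem.Dict.getD_empty]

theorem bDict_keys (wl : List String) (f : String → Int) :
    (wl.foldl (fun d w => d.insert w (f w)) PySem.Dict.empty).keys =
      PySem.Set.ofList wl := by
  rw [PySem.Dict.keys_foldl_insert wl (fun _ w => f w) PySem.Dict.empty]
  simp [PySem.Dict.keys_empty, PySem.Set.update_nil_left]

theorem getD_foldl_insert_fun (f : String → Int) (l : List String) (d : PySem.Dict String Int)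
    (k : String) :
    (l.foldl (fun d w => d.insert w (f w)) d).getD k 0 =
      if k ∈ l then f k else d.getD k 0 := by
  induction l generalizing d with
  | nil => simp
  | cons w l ih =>
      rw [List.foldl_cons, ih, PySem.Dict.getD_insert]
      by_cases hk : k ∈ l
      · simp [hk]
      · by_cases hkw : k = w <;> simp [hk, hkw]

-- ---- counting bridge: countP by membership = sum of counts over the distinct elements ----

theorem sum_indicator_nodup (a : Char) (dd : List Char) (h : dd.Nodup) :
    ((dd.map (fun c => if c = a then 1 else 0)).sum : Nat) = if a ∈ dd then 1 else 0 := by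
  induction dd with
  | nil => simp
  | cons b dd ih =>
      rcases List.nodup_cons.1 h with ⟨hb, hdd⟩
      rw [List.map_cons, List.sum_cons, ih hdd]
      by_cases hba : b = a
      · subst hba
        simp [hb]
      · rw [if_neg hba]
        by_cases ha : a ∈ dd
        · rw [if_pos ha, if_pos (List.mem_cons_of_mem b ha)]
        · rw [if_neg ha, if_neg (fun h' => by
            rcases List.mem_cons.1 h' with h'' | h''
            · exact hba h''.symm
            · exact ha h'')]

theorem countP_mem_eq_sum_counts (l : List Char) (dd : List Char) (h : dd.Nodup) :
    l.countP (fun c => decide (c ∈ dd)) = (dd.map (fun c => l.count c)).sum := by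
  induction l with
  | nil =>
      simp only [List.countP_nil, List.count_nil]
      simp [List.map_const']
  | cons a l ih =>
      rw [List.countP_cons, ih]
      have hmap : (dd.map (fun c => (a :: l).count c)) =
          (dd.map (fun c => l.count c + if c = a then 1 else 0)) := by
        apply List.map_congr_left
        intro c _
        rw [List.count_cons]
        by_cases hca : c = a
        · subst hca; simp
        · have hbeq : (a == c) = false := beq_eq_false_iff_ne.2 (fun h' => hca h'.symm)
          simp [hbeq, hca]
      rw [hmap, List.sum_map_add, sum_indicator_nodup a dd h]
      simp

theorem bWeight_eq_wSum (wl : List String) (k : String) :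
    bWeight (bCounts wl) k = (wSum wl k : Int) := by
  unfold bWeight wSum
  have h1 : ((PySem.Set.ofList k.toList).map (fun c => (bCounts wl).getD c 0)) =
      ((PySem.Set.ofList k.toList).map (fun c => (wl.flatMap String.toList).count c)).map
        Nat.cast := by
    rw [List.map_map]
    exact List.map_congr_left (fun c _ => bCounts_getD wl c)
  rw [h1, ← Nat.cast_list_sum]
  have h2 : (wl.flatMap String.toList).countP (fun c => decide (c ∈ k.toList)) =
      (wl.flatMap String.toList).countP (fun c => decide (c ∈ PySem.Set.ofList k.toList)) :=
    List.countP_congr (fun c _ => by simp [PySem.Set.mem_ofList])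
  rw [h2, countP_mem_eq_sum_counts _ _ (PySem.Set.nodup_ofList k.toList)]

-- ===== VERDICT (by name: the statement is the Claim_ definition above) =====
theorem get_networked_weight_spec : Claim_equal_get_networked_weight := by
  intro wl _
  unfold Spec_get_networked_weight get_networked_weight get_networked_weight_alt
  rw [PySem.Dict.items_eq_map_keys _ (by rw [aFinal_keys]; exact PySem.Set.nodup_ofList wl) 0,
    aFinal_keys,
    PySem.Dict.items_eq_map_keys _
      (by rw [bDict_keys]; exact PySem.Set.nodup_ofList wl) 0, bDict_keys]
  apply List.map_congr_left
  intro k hk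
  rw [aFinal_getD, getD_foldl_insert_fun, if_pos ((PySem.Set.mem_ofList wl k).1 hk),
    bWeight_eq_wSum, bMult_getD]
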